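-- pv_equiv track=rewrite | github.com/overtrack-gg/overtrack-game-processing | overtrack/apex/game/match_summary/match_summary_processor.py | _parse_stat_number
-- ===== SOURCE A (Python) =====
-- from typing import Optional, Tuple
--
-- def _parse_stat_number(stat_value_s: str) -> Optional[int]:
--     stat_value_s = stat_value_s.upper()
--
--     # common errors in parsing digits
--     for s1, s2 in 'D0', 'I1', 'L1':
--         stat_value_s = stat_value_s.replace(s1, s2)
--
--     # remove brackets, spaces, X (e.g. in "Kills (x3)"), time separators, commas
--     stat_value_s = ''.join(c for c in stat_value_s if c not in '() X:.,;|')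
--
--     try:
--         return int(stat_value_s)
--     except ValueError:
--         return None
-- ===== SOURCE B (Python) =====
-- _MAP = {'D': '0', 'I': '1', 'L': '1'}
-- _DROP = frozenset('() X:.,;|')
--
--
-- def _parse_stat_number(stat_value_s):
--     out = []
--     for c in stat_value_s.upper():
--         m = _MAP.get(c)
--         if m is not None:
--             out.append(m)
--         elif c not in _DROP:
--             out.append(c)
--     try:
--         return int(''.join(out))
--     except ValueError:
--         return None
-- ===== Notes on version B (the rewrite author's own statement) =====
-- stated objective: alternative
-- what changed: Replaces A's three sequential str.replace scans plus a separate filter comprehension (four passes over the string) with a single pass that maps/drops/keeps each character via a replacement dict and a deletion set, then parses with int().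
import Mathlib
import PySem

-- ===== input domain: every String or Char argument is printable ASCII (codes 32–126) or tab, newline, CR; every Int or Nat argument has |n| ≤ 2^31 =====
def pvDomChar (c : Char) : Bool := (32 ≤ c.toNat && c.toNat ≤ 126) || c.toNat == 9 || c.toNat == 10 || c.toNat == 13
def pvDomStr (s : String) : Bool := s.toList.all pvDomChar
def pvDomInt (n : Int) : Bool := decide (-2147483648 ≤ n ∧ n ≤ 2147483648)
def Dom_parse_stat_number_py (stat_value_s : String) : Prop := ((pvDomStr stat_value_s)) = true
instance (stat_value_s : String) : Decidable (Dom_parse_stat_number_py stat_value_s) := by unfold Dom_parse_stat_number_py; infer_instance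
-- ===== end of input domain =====

-- B replaces A's three sequential .replace passes plus a filter comprehension with one
-- single pass mapping/dropping/keeping each character (objective: alternative decomposition).

-- ===== PORT A =====
-- A: upper, three single-char .replace passes, a filter comprehension, then int() (None on ValueError).
def parse_stat_number_py (stat_value_s : String) : Option Int :=
  let s0 := PySem.Str.upper stat_value_s
  let s1 := PySem.Str.replace s0 "D" "0"
  let s2 := PySem.Str.replace s1 "I" "1"
  let s3 := PySem.Str.replace s2 "L" "1"
  let s4 := String.ofList (s3.toList.filter (fun c => !("() X:.,;|".toList.contains c)))
  PySem.Int.ofStr? s4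

-- ===== PORT B =====
-- B: one pass over the uppercased string: map via the replacement dict, skip the deletion set, else keep; then int().
def bMap : List (Char × Char) := [('D', '0'), ('I', '1'), ('L', '1')]

def bStep (acc : List Char) (c : Char) : List Char :=
  match bMap.lookup c with
  | some m => acc ++ [m]
  | none => if "() X:.,;|".toList.contains c then acc else acc ++ [c]

def parse_stat_number_py_alt (stat_value_s : String) : Option Int :=
  PySem.Int.ofChars? ((PySem.Str.upper stat_value_s).toList.foldl bStep [])

-- ===== PRECONDITION & SPEC =====
def Spec_parse_stat_number_py (stat_value_s : String) (out : Option Int) : Prop := out = parse_stat_number_py_alt stat_value_s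
instance (stat_value_s : String) (out : Option Int) : Decidable (Spec_parse_stat_number_py stat_value_s out) := by unfold Spec_parse_stat_number_py; infer_instance

-- ===== CLAIM (what is proved, stated in full; the proofs are below) =====
def Claim_equal_parse_stat_number_py : Prop := ∀ (stat_value_s : String), Dom_parse_stat_number_py stat_value_s → Spec_parse_stat_number_py stat_value_s (parse_stat_number_py stat_value_s)

-- ===== LEMMAS AND PROOFS =====

-- single-char str.replace is a pointwise map over the characters
theorem go_single (d r : Char) : ∀ (fuel : Nat) (l acc : List Char), l.length ≤ fuel →
    PySem.Chars.replace.go [d] [r] fuel l acc =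
      acc.reverse ++ l.map (fun c => if c = d then r else c) := by
  intro fuel
  induction fuel with
  | zero => intro l acc h
            have : l = [] := List.eq_nil_of_length_eq_zero (Nat.le_zero.mp h)
            subst this; simp [PySem.Chars.replace.go]
  | succ n ih =>
    intro l acc h
    cases l with
    | nil => simp [PySem.Chars.replace.go]
    | cons c t =>
      rw [PySem.Chars.replace.go]
      by_cases hc : c = d
      · subst hc
        have hpre : List.isPrefixOf [c] (c :: t) = true := by simp [List.isPrefixOf]
        simp only [hpre, if_pos]
        rw [ih _ _ (by simpa using Nat.le_of_succ_le_succ h)]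
        simp
      · have hpre : List.isPrefixOf [d] (c :: t) = false := by
          simp [List.isPrefixOf]; exact fun h' => hc h'.symm
        simp only [hpre, Bool.false_eq_true, if_false]
        rw [ih t (c :: acc) (by simpa using Nat.le_of_succ_le_succ h)]
        simp [hc]

theorem replace_single (d r : Char) (l : List Char) :
    PySem.Chars.replace l [d] [r] = l.map (fun c => if c = d then r else c) := by
  rw [PySem.Chars.replace]
  simp only [List.isEmpty_cons, Bool.false_eq_true, if_false]
  simpa using go_single d r l.length l [] (le_refl _)

-- the per-character effect of A's three replaces composed, and A's filter predicate
def fA (c : Char) : Char := if c = 'D' then '0' else if c = 'I' then '1' else if c = 'L' then '1' else c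
def pA (c : Char) : Bool := !("() X:.,;|".toList.contains c)

-- B's single-pass step is exactly "map with fA, then keep iff pA"
theorem bStep_eq (acc : List Char) (c : Char) :
    bStep acc c = if pA (fA c) then acc ++ [fA c] else acc := by
  unfold bStep bMap fA pA
  by_cases hD : c = 'D'
  · subst hD; simp [List.lookup]
  · by_cases hI : c = 'I'
    · subst hI; simp [List.lookup]
    · by_cases hL : c = 'L'
      · subst hL; simp [List.lookup]
      · have hD' : (c == 'D') = false := by simp [hD]
        have hI' : (c == 'I') = false := by simp [hI]
        have hL' : (c == 'L') = false := by simp [hL]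
        simp only [List.lookup, hD', hI', hL', if_neg hD, if_neg hI, if_neg hL]
        cases h : "() X:.,;|".toList.contains c <;> simp [h]

theorem foldl_bStep (l acc : List Char) :
    l.foldl bStep acc = acc ++ ((l.map fA).filter pA) := by
  have hb : bStep = fun acc c => if pA (fA c) then acc ++ [fA c] else acc :=
    funext fun acc => funext fun c => bStep_eq acc c
  rw [hb, PySem.List.foldl_append_if, List.filter_map]
  rfl

theorem fchain (c : Char) :
    (fun x => if x = 'L' then '1' else x) ((fun x => if x = 'I' then '1' else x) ((fun x => if x = 'D' then '0' else x) c)) = fA c := by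
  unfold fA
  by_cases hD : c = 'D'
  · simp [hD]
  · by_cases hI : c = 'I'
    · simp [hI]
    · by_cases hL : c = 'L'
      · simp [hL]
      · simp [hD, hI, hL]

theorem main_eq (s : String) : parse_stat_number_py s = parse_stat_number_py_alt s := by
  unfold parse_stat_number_py parse_stat_number_py_alt
  simp only [PySem.Int.ofStr?, String.toList_ofList, PySem.Str.toList_replace]
  rw [foldl_bStep, List.nil_append]
  have h1 : ("D" : String).toList = ['D'] := by decide
  have h2 : ("0" : String).toList = ['0'] := by decide
  have h3 : ("I" : String).toList = ['I'] := by decide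
  have h4 : ("1" : String).toList = ['1'] := by decide
  have h5 : ("L" : String).toList = ['L'] := by decide
  rw [h1, h2, h3, h4, h5, replace_single, replace_single, replace_single]
  have hmm : ∀ (l : List Char),
      ((l.map (fun c => if c = 'D' then '0' else c)).map (fun c => if c = 'I' then '1' else c)).map
        (fun c => if c = 'L' then '1' else c) = l.map fA := by
    intro l
    rw [List.map_map, List.map_map]
    apply List.map_congr_left
    intro c _
    exact fchain c
  rw [hmm]
  rfl

-- ===== VERDICT (by name: the statement is the Claim_ definition above) =====
theorem parse_stat_number_py_spec : Claim_equal_parse_stat_number_py := by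
  intro s _
  unfold Spec_parse_stat_number_py
  exact main_eq s
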